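-- pv_equiv track=rewrite | github.com/govilvipul/HealthcareCM | src/utils/case_utils.py | get_case_metrics
-- ===== SOURCE A (Python) =====
-- from typing import List, Dict, Any
--
-- def get_case_metrics(cases: List[Dict]) -> Dict:
--     """Calculate case metrics"""
--     total_cases = len(cases)
--     pending_cases = len([c for c in cases if c.get('status') == 'PENDING_REVIEW'])
--     high_priority = len([c for c in cases if c.get('priority') == 'HIGH'])
--     approved_cases = len([c for c in cases if c.get('status') == 'APPROVED'])
--
--     return {
--         'total_cases': total_cases,
--         'pending_cases': pending_cases,
--         'high_priority': high_priority,
--         'approved_cases': approved_cases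
--     }
-- ===== SOURCE B (Python) =====
-- def get_case_metrics(cases):
--     """Calculate case metrics via frequency tables: tabulate how often every
--     status and priority value occurs, then read the needed counts off."""
--     status_counts = {}
--     priority_counts = {}
--     for c in cases:
--         s = c.get('status')
--         status_counts[s] = status_counts.get(s, 0) + 1
--         p = c.get('priority')
--         priority_counts[p] = priority_counts.get(p, 0) + 1
--     return {
--         'total_cases': len(cases),
--         'pending_cases': status_counts.get('PENDING_REVIEW', 0),
--         'high_priority': priority_counts.get('HIGH', 0),
--         'approved_cases': status_counts.get('APPROVED', 0)
--     }
-- ===== Notes on version B (the rewrite author's own statement) =====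
-- stated objective: alternative
-- what changed: Instead of filtering the list once per predicate, B builds frequency tables (dicts keyed by status and by priority values) in one tabulating pass and reads the three requested counts off by dictionary lookup.
import Mathlib
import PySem

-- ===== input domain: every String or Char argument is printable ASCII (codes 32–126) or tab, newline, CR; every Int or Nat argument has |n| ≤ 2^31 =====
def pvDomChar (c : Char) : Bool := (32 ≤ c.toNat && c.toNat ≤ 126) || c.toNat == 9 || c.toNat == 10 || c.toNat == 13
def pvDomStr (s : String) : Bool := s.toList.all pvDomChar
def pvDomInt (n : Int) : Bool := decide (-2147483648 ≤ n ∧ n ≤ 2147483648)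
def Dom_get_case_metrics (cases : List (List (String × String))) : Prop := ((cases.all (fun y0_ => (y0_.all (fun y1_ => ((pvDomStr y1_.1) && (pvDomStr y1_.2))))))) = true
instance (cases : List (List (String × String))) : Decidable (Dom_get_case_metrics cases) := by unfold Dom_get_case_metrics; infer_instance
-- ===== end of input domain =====

-- B replaces A's four separate filtering scans with one pass that tabulates frequency tables
-- keyed by status and priority values, from which the requested counts are looked up (objective: alternative).

-- ===== PORT A =====
def get_case_metrics (cases : List (List (String × String))) : List (String × Int) :=
  let total_cases : Int := cases.length
  let pending_cases : Int := (cases.filter (fun c => (PySem.Dict.mk c).get? "status" == some "PENDING_REVIEW")).length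
  let high_priority : Int := (cases.filter (fun c => (PySem.Dict.mk c).get? "priority" == some "HIGH")).length
  let approved_cases : Int := (cases.filter (fun c => (PySem.Dict.mk c).get? "status" == some "APPROVED")).length
  [("total_cases", total_cases), ("pending_cases", pending_cases),
   ("high_priority", high_priority), ("approved_cases", approved_cases)]

-- ===== PORT B =====
-- the loop body: d[k] = d.get(k, 0) + 1 for the status table, then for the priority table
def get_case_metrics_alt_step
    (acc : PySem.Dict (Option String) Int × PySem.Dict (Option String) Int)
    (c : List (String × String)) :
    PySem.Dict (Option String) Int × PySem.Dict (Option String) Int :=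
  let s := (PySem.Dict.mk c).get? "status"
  let acc1 := (acc.1.insert s (acc.1.getD s 0 + 1), acc.2)
  let p := (PySem.Dict.mk c).get? "priority"
  (acc1.1, acc1.2.insert p (acc1.2.getD p 0 + 1))

def get_case_metrics_alt (cases : List (List (String × String))) : List (String × Int) :=
  let tables := cases.foldl get_case_metrics_alt_step (PySem.Dict.empty, PySem.Dict.empty)
  [("total_cases", (cases.length : Int)),
   ("pending_cases", tables.1.getD (some "PENDING_REVIEW") 0),
   ("high_priority", tables.2.getD (some "HIGH") 0),
   ("approved_cases", tables.1.getD (some "APPROVED") 0)]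

-- ===== PRECONDITION & SPEC =====
def Spec_get_case_metrics (cases : List (List (String × String))) (out : List (String × Int)) : Prop := out = get_case_metrics_alt cases
instance (cases : List (List (String × String))) (out : List (String × Int)) : Decidable (Spec_get_case_metrics cases out) := by unfold Spec_get_case_metrics; infer_instance

-- ===== CLAIM (what is proved, stated in full; the proofs are below) =====
def Claim_equal_get_case_metrics : Prop := ∀ (cases : List (List (String × String))), Dom_get_case_metrics cases → Spec_get_case_metrics cases (get_case_metrics cases)

-- ===== LEMMAS AND PROOFS =====

-- the fold builds exactly the Counter of the mapped status values and of the mapped priority values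
theorem alt_tables (cases : List (List (String × String)))
    (d1 d2 : PySem.Dict (Option String) Int) :
    cases.foldl get_case_metrics_alt_step (d1, d2) =
      ((cases.map (fun c => (PySem.Dict.mk c).get? "status")).foldl
         (fun d x => d.modify x 0 (· + 1)) d1,
       (cases.map (fun c => (PySem.Dict.mk c).get? "priority")).foldl
         (fun d x => d.modify x 0 (· + 1)) d2) := by
  induction cases generalizing d1 d2 with
  | nil => rfl
  | cons c rest ih =>
    simp only [List.foldl_cons, List.map_cons]
    rw [ih]
    congr 1

theorem count_map_eq_filter_length (cases : List (List (String × String)))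
    (key val : String) :
    ((cases.map (fun c => (PySem.Dict.mk c).get? key)).count (some val) : Int) =
      ((cases.filter (fun c => (PySem.Dict.mk c).get? key == some val)).length : Int) := by
  rw [List.count_eq_countP, List.countP_map]
  simp [Function.comp_def, List.countP_eq_length_filter]

-- ===== VERDICT (by name: the statement is the Claim_ definition above) =====
theorem get_case_metrics_spec : Claim_equal_get_case_metrics := by
  intro cases _
  unfold Spec_get_case_metrics get_case_metrics get_case_metrics_alt
  rw [alt_tables]
  simp only [PySem.Dict.getD_foldl_modify_add_one]
  simp [count_map_eq_filter_length]
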